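-- pv_equiv track=rewrite | github.com/shuzhao-li-lab/PythonCentricPipelineForMetabolomics | pcpfm/helpers/randomizer.py | bin_to_quantiles
-- ===== SOURCE A (Python) =====
-- def bin_to_quantiles(values, quantiles):
--     bins = []
--     for value in values:
--         for quantile, quant_cutoff in enumerate(quantiles):
--             if quant_cutoff < value:
--                 pass
--             elif quant_cutoff >= value:
--                 bins.append(quantile)
--                 break
--     return bins
-- ===== SOURCE B (Python) =====
-- def bin_to_quantiles(values, quantiles):
--     # "record" cutoffs (strictly greater than every earlier cutoff) are the only
--     # possible first-hits; their cutoffs are strictly increasing, so binary search.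
--     recs = []  # list of (cutoff, index), cutoffs strictly increasing
--     for i, c in enumerate(quantiles):
--         if not recs or c > recs[-1][0]:
--             recs.append((c, i))
--     cuts = [c for c, _ in recs]
--     r = len(recs)
--     bins = []
--     for v in values:
--         lo, hi = 0, r
--         while lo < hi:
--             mid = (lo + hi) // 2
--             if cuts[mid] < v:
--                 lo = mid + 1
--             else:
--                 hi = mid
--         if lo < r:
--             bins.append(recs[lo][1])
--     return bins
-- ===== Notes on version B (the rewrite author's own statement) =====
-- stated objective: faster
-- what changed: Instead of rescanning all quantiles per value, B precomputes the strictly-increasing subsequence of 'record' cutoffs (the only possible first hits) in one pass and binary-searches it per value.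
import Mathlib
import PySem

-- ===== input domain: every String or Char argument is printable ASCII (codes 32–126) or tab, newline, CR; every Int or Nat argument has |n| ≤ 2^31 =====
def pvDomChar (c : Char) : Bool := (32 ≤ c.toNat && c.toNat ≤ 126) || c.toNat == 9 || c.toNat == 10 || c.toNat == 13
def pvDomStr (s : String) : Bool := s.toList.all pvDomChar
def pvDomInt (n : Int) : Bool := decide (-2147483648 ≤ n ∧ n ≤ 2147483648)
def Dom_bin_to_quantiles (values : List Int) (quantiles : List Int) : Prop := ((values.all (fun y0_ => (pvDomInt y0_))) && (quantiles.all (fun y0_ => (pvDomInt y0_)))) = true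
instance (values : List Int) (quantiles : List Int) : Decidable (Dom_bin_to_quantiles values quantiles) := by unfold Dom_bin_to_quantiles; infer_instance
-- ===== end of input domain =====

-- B replaces A's per-value rescan of all quantiles by a one-pass "record cutoff" index plus
-- binary search per value (measured faster, asymptotic change).

-- ===== PORT A =====
-- inner 'for quantile, quant_cutoff in enumerate(quantiles)' loop with break
def binInnerA (value : Int) : List (Int × Int) → List Int → List Int
  | [], bins => bins
  | (quantile, cutoff) :: rest, bins =>
    if cutoff < value then binInnerA value rest bins
    else bins ++ [quantile]

def bin_to_quantiles (values : List Int) (quantiles : List Int) : List Int :=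
  values.foldl (fun bins value => binInnerA value (PySem.List.enumerate quantiles 0) bins) []

-- ===== PORT B =====
-- one step of B's record-collecting loop: 'if not recs or c > recs[-1][0]: recs.append((c, i))'
def recStep (rs : List (Int × Int)) (p : Int × Int) : List (Int × Int) :=
  if rs.getLast?.all (fun q => decide (q.1 < p.2)) then rs ++ [(p.2, p.1)] else rs

def buildRecs (quantiles : List Int) : List (Int × Int) :=
  (PySem.List.enumerate quantiles 0).foldl recStep []

-- B's 'while lo < hi' binary-search loop; the fuel argument only bounds the
-- iteration count (hi - lo halves each step), it never changes the computed value
def bsearch (cuts : List Int) (v : Int) : Nat → Nat → Nat → Nat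
  | 0, lo, _ => lo
  | fuel + 1, lo, hi =>
    if lo < hi then
      let mid := (lo + hi) / 2
      if cuts.getD mid 0 < v then bsearch cuts v fuel (mid + 1) hi
      else bsearch cuts v fuel lo mid
    else lo

def bin_to_quantiles_alt (values : List Int) (quantiles : List Int) : List Int :=
  let recs := buildRecs quantiles
  let cuts := recs.map (fun p => p.1)
  let r := recs.length
  values.foldl (fun bins v =>
    let lo := bsearch cuts v r 0 r
    if lo < r then bins ++ [(recs.getD lo (0, 0)).2] else bins) []

-- ===== PRECONDITION & SPEC =====
def Spec_bin_to_quantiles (values : List Int) (quantiles : List Int) (out : List Int) : Prop := out = bin_to_quantiles_alt values quantiles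
instance (values : List Int) (quantiles : List Int) (out : List Int) : Decidable (Spec_bin_to_quantiles values quantiles out) := by unfold Spec_bin_to_quantiles; infer_instance

-- ===== CLAIM (what is proved, stated in full; the proofs are below) =====
def Claim_equal_bin_to_quantiles : Prop := ∀ (values : List Int) (quantiles : List Int), Dom_bin_to_quantiles values quantiles → Spec_bin_to_quantiles values quantiles (bin_to_quantiles values quantiles)

-- ===== LEMMAS AND PROOFS =====

-- per-value answer of A: first (index, cutoff) with cutoff >= value
def ansA (v : Int) (qs : List Int) : List Int :=
  match (PySem.List.enumerate qs 0).find? (fun p => decide (v <= p.2)) with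
  | some p => [p.1]
  | none => []

def findRec (v : Int) (rs : List (Int × Int)) : Option (Int × Int) :=
  rs.find? (fun p => decide (v <= p.1))

theorem binInnerA_eq (v : Int) (l : List (Int × Int)) (bins : List Int) :
    binInnerA v l bins = bins ++ (match l.find? (fun p => decide (v <= p.2)) with
      | some p => [p.1] | none => []) := by
  induction l generalizing bins with
  | nil => simp [binInnerA, List.find?]
  | cons h t ih =>
    obtain ⟨q, c⟩ := h
    by_cases hc : c < v
    · have hv : ¬ (v <= c) := by omega
      simp [binInnerA, hc, hv, ih]
    · have hv : v <= c := by omega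
      simp [binInnerA, hc, hv]

theorem find?_of_first {α : Type} (p : α → Bool) (d : α) :
    ∀ (l : List α) (r : Nat), r < l.length → (∀ j, j < r → p (l.getD j d) = false) →
    p (l.getD r d) = true → l.find? p = some (l.getD r d) := by
  intro l
  induction l with
  | nil => intro r hr; simp at hr
  | cons x t ih =>
    intro r hr hlt hp
    cases r with
    | zero =>
      simp only [List.getD_cons_zero] at hp ⊢
      simp [hp]
    | succ n =>
      have h0 : p x = false := by simpa using hlt 0 (by omega)
      simp only [List.getD_cons_succ] at hp ⊢
      simp only [List.find?_cons, h0]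
      exact ih n (by simpa using hr)
        (fun j hj => by simpa using hlt (j + 1) (by omega)) hp

theorem getLast?_mem' {α : Type} : ∀ (l : List α) (a : α), l.getLast? = some a → a ∈ l := by
  intro l
  induction l with
  | nil => simp
  | cons x t ih =>
    intro a h
    cases t with
    | nil => simp at h; simp [h]
    | cons y u =>
      rw [List.getLast?_cons_cons] at h
      exact List.mem_cons_of_mem _ (ih a h)

theorem pairwise_lt_last : ∀ (l : List (Int × Int)), l.Pairwise (fun p q => p.1 < q.1) →
    ∀ p0, l.getLast? = some p0 → ∀ a ∈ l, a.1 <= p0.1 := by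
  intro l
  induction l with
  | nil => simp
  | cons x t ih =>
    intro hp p0 hl a ha
    cases t with
    | nil =>
      simp only [List.getLast?_singleton, Option.some.injEq] at hl
      rcases List.mem_singleton.mp ha with rfl
      rw [← hl]
    | cons y u =>
      rw [List.getLast?_cons_cons] at hl
      rcases List.mem_cons.mp ha with rfl | ha'
      · have hmem : p0 ∈ y :: u := getLast?_mem' _ _ hl
        have := (List.pairwise_cons.mp hp).1 p0 hmem
        omega
      · exact ih (List.pairwise_cons.mp hp).2 p0 hl a ha'

-- the fold of records preserves linear-search results
theorem findRec_fold (qs : List Int) : ∀ (k : Int) (rs : List (Int × Int)) (v : Int),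
    findRec v ((PySem.List.enumerate qs k).foldl recStep rs)
      = (findRec v rs).or (((PySem.List.enumerate qs k).find? (fun p => decide (v <= p.2))).map
          (fun p => (p.2, p.1))) := by
  induction qs with
  | nil => intro k rs v; simp [PySem.List.enumerate_nil]
  | cons q rest ih =>
    intro k rs v
    rw [PySem.List.enumerate_cons]
    simp only [List.foldl_cons]
    rw [ih]
    by_cases hap : (rs.getLast?.all (fun q' => decide (q'.1 < q))) = true
    · have hstep : recStep rs (k, q) = rs ++ [(q, k)] := by simp [recStep, hap]
      rw [hstep]
      unfold findRec
      rw [List.find?_append]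
      by_cases hv : v <= q
      · simp [hv]
      · simp [hv]
    · have hstep : recStep rs (k, q) = rs := by simp [recStep, hap]
      rw [hstep]
      cases hrs : findRec v rs with
      | some x => simp
      | none =>
        have hall := List.find?_eq_none.mp hrs
        cases hgl : rs.getLast? with
        | none => simp [hgl] at hap
        | some p0 =>
          have hp0 : ¬ (p0.1 < q) := by simpa [hgl] using hap
          have hmem : p0 ∈ rs := getLast?_mem' _ _ hgl
          have hlt : p0.1 < v := by
            have := hall p0 hmem
            simp at this
            omega
          have hq : ¬ (v <= q) := by omega
          simp [hq]

-- record cutoffs are strictly increasing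
theorem recs_pairwise (qs : List Int) : ∀ (k : Int) (rs : List (Int × Int)),
    rs.Pairwise (fun p q => p.1 < q.1) →
    ((PySem.List.enumerate qs k).foldl recStep rs).Pairwise (fun p q => p.1 < q.1) := by
  induction qs with
  | nil => intro k rs h; simpa [PySem.List.enumerate_nil] using h
  | cons q rest ih =>
    intro k rs h
    rw [PySem.List.enumerate_cons]
    simp only [List.foldl_cons]
    apply ih
    by_cases hap : (rs.getLast?.all (fun q' => decide (q'.1 < q))) = true
    · have hstep : recStep rs (k, q) = rs ++ [(q, k)] := by simp [recStep, hap]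
      rw [hstep, List.pairwise_append]
      refine ⟨h, by simp, ?_⟩
      intro a ha b hb
      rcases List.mem_singleton.mp hb with rfl
      cases hgl : rs.getLast? with
      | none =>
        rw [List.getLast?_eq_none_iff] at hgl
        subst hgl
        simp at ha
      | some p0 =>
        have h1 : p0.1 < q := by simpa [hgl] using hap
        have h2 := pairwise_lt_last rs h p0 hgl a ha
        show a.1 < q
        omega
    · have hstep : recStep rs (k, q) = rs := by simp [recStep, hap]
      rw [hstep]
      exact h

theorem bsearch_spec (cuts : List Int) (v : Int) (hs : cuts.Pairwise (· <= ·)) :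
    ∀ (n lo hi : Nat), hi - lo <= n → hi <= cuts.length → lo <= hi →
    (∀ j, j < lo → cuts.getD j 0 < v) →
    (∀ j, hi <= j → j < cuts.length → v <= cuts.getD j 0) →
    lo <= bsearch cuts v n lo hi ∧ bsearch cuts v n lo hi <= hi ∧
      (∀ j, j < bsearch cuts v n lo hi → cuts.getD j 0 < v) ∧
      (∀ j, bsearch cuts v n lo hi <= j → j < cuts.length → v <= cuts.getD j 0) := by
  have hmono : ∀ i j, i <= j → j < cuts.length → cuts.getD i 0 <= cuts.getD j 0 := by
    intro i j hij hj
    rcases Nat.eq_or_lt_of_le hij with rfl | hlt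
    · exact le_refl _
    · rw [List.getD_eq_getElem _ _ (Nat.lt_trans hlt hj), List.getD_eq_getElem _ _ hj]
      exact List.pairwise_iff_getElem.mp hs i j (Nat.lt_trans hlt hj) hj hlt
  intro n
  induction n with
  | zero =>
    intro lo hi hn hhi hlh hlow hhigh
    simp only [bsearch]
    exact ⟨Nat.le_refl _, by omega, hlow, fun j hj hjl => hhigh j (by omega) hjl⟩
  | succ n ih =>
    intro lo hi hn hhi hlh hlow hhigh
    by_cases hlt : lo < hi
    · simp only [bsearch, if_pos hlt]
      by_cases hm : cuts.getD ((lo + hi) / 2) 0 < v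
      · rw [if_pos hm]
        have hlow' : ∀ j, j < (lo + hi) / 2 + 1 → cuts.getD j 0 < v := by
          intro j hj
          rcases Nat.lt_or_ge j ((lo + hi) / 2) with h1 | h1
          · exact lt_of_le_of_lt (hmono j ((lo + hi) / 2) (by omega) (by omega)) hm
          · have hje : j = (lo + hi) / 2 := by omega
            rw [hje]; exact hm
        obtain ⟨a1, a2, a3, a4⟩ := ih ((lo + hi) / 2 + 1) hi (by omega) hhi (by omega) hlow' hhigh
        exact ⟨by omega, a2, a3, a4⟩
      · rw [if_neg hm]
        have hhigh' : ∀ j, (lo + hi) / 2 <= j → j < cuts.length → v <= cuts.getD j 0 := by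
          intro j hj hjl
          exact le_trans (by omega) (hmono ((lo + hi) / 2) j hj hjl)
        obtain ⟨a1, a2, a3, a4⟩ := ih lo ((lo + hi) / 2) (by omega) (by omega) (by omega) hlow hhigh'
        exact ⟨a1, by omega, a3, a4⟩
    · simp only [bsearch, if_neg hlt]
      exact ⟨Nat.le_refl _, by omega, hlow, fun j hj hjl => hhigh j (by omega) hjl⟩

theorem alt_per_value (quantiles : List Int) (v : Int) :
    (let lo := bsearch ((buildRecs quantiles).map (fun p => p.1)) v (buildRecs quantiles).length 0 (buildRecs quantiles).length
     if lo < (buildRecs quantiles).length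
     then [((buildRecs quantiles).getD lo ((0 : Int), (0 : Int))).2] else [])
      = ansA v quantiles := by
  have hpair : (buildRecs quantiles).Pairwise (fun p q => p.1 < q.1) :=
    recs_pairwise quantiles 0 [] List.Pairwise.nil
  have hcpair : ((buildRecs quantiles).map (fun p => p.1)).Pairwise (· <= ·) :=
    hpair.map _ (fun a b h => le_of_lt h)
  have hlen : ((buildRecs quantiles).map (fun p => p.1)).length = (buildRecs quantiles).length :=
    List.length_map _
  have hcut : ∀ j, j < (buildRecs quantiles).length →
      ((buildRecs quantiles).map (fun p => p.1)).getD j 0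
        = ((buildRecs quantiles).getD j ((0 : Int), (0 : Int))).1 := by
    intro j hj
    rw [List.getD_eq_getElem _ _ (by omega), List.getD_eq_getElem _ _ hj, List.getElem_map]
  obtain ⟨h1, h2, h3, h4⟩ := bsearch_spec ((buildRecs quantiles).map (fun p => p.1)) v hcpair
    (buildRecs quantiles).length 0 (buildRecs quantiles).length (by omega) (by omega) (by omega)
    (fun j hj => by omega) (fun j hj hjl => by omega)
  have hrec : findRec v (buildRecs quantiles)
      = ((PySem.List.enumerate quantiles 0).find? (fun p => decide (v <= p.2))).map
          (fun p => (p.2, p.1)) := by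
    have := findRec_fold quantiles 0 [] v
    simpa [findRec, buildRecs] using this
  show (if bsearch ((buildRecs quantiles).map (fun p => p.1)) v (buildRecs quantiles).length 0 (buildRecs quantiles).length
        < (buildRecs quantiles).length
      then [((buildRecs quantiles).getD
        (bsearch ((buildRecs quantiles).map (fun p => p.1)) v (buildRecs quantiles).length 0 (buildRecs quantiles).length)
        ((0 : Int), (0 : Int))).2] else []) = ansA v quantiles
  by_cases hlo : bsearch ((buildRecs quantiles).map (fun p => p.1)) v (buildRecs quantiles).length 0 (buildRecs quantiles).length
      < (buildRecs quantiles).length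
  · rw [if_pos hlo]
    have hfind : (buildRecs quantiles).find? (fun p => decide (v <= p.1))
        = some ((buildRecs quantiles).getD
            (bsearch ((buildRecs quantiles).map (fun p => p.1)) v (buildRecs quantiles).length 0 (buildRecs quantiles).length)
            ((0 : Int), (0 : Int))) := by
      apply find?_of_first _ _ _ _ hlo
      · intro j hj
        have hjlen : j < (buildRecs quantiles).length := Nat.lt_trans hj hlo
        have := h3 j hj
        rw [hcut j hjlen] at this
        simp only [decide_eq_false_iff_not]
        omega
      · have := h4 _ (Nat.le_refl _) (by omega)
        rw [hcut _ hlo] at this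
        simpa using this
    rw [show (buildRecs quantiles).find? (fun p => decide (v <= p.1)) = findRec v (buildRecs quantiles) from rfl, hrec] at hfind
    cases henum : (PySem.List.enumerate quantiles 0).find? (fun p => decide (v <= p.2)) with
    | none => rw [henum] at hfind; simp at hfind
    | some p =>
      rw [henum] at hfind
      simp only [Option.map_some, Option.some.injEq] at hfind
      rw [← hfind]
      simp [ansA, henum]
  · rw [if_neg hlo]
    have hnone : findRec v (buildRecs quantiles) = none := by
      unfold findRec
      rw [List.find?_eq_none]
      intro x hx
      rcases List.mem_iff_getElem.mp hx with ⟨i, hi, rfl⟩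
      have := h3 i (by omega)
      rw [hcut i hi, List.getD_eq_getElem _ _ hi] at this
      simp only [decide_eq_true_eq]
      omega
    rw [hrec] at hnone
    cases henum : (PySem.List.enumerate quantiles 0).find? (fun p => decide (v <= p.2)) with
    | none => simp [ansA, henum]
    | some p => rw [henum] at hnone; simp at hnone

-- ===== VERDICT (by name: the statement is the Claim_ definition above) =====
theorem bin_to_quantiles_spec : Claim_equal_bin_to_quantiles := by
  intro values quantiles _
  show bin_to_quantiles values quantiles = bin_to_quantiles_alt values quantiles
  have hA : bin_to_quantiles values quantiles
      = values.flatMap (fun v => ansA v quantiles) := by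
    unfold bin_to_quantiles
    simp only [binInnerA_eq]
    rw [PySem.List.foldl_append_eq_flatMap]
    simp [ansA]
  have hB : bin_to_quantiles_alt values quantiles
      = values.flatMap (fun v => ansA v quantiles) := by
    unfold bin_to_quantiles_alt
    have hfun : (fun (bins : List Int) (v : Int) =>
        if bsearch ((buildRecs quantiles).map (fun p => p.1)) v (buildRecs quantiles).length 0 (buildRecs quantiles).length
            < (buildRecs quantiles).length
        then bins ++ [((buildRecs quantiles).getD
          (bsearch ((buildRecs quantiles).map (fun p => p.1)) v (buildRecs quantiles).length 0 (buildRecs quantiles).length)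
          ((0 : Int), (0 : Int))).2] else bins)
        = (fun (bins : List Int) (v : Int) => bins ++ ansA v quantiles) := by
      funext bins v
      rw [← alt_per_value quantiles v]
      show (if bsearch ((buildRecs quantiles).map (fun p => p.1)) v (buildRecs quantiles).length 0 (buildRecs quantiles).length
            < (buildRecs quantiles).length
          then bins ++ [((buildRecs quantiles).getD
            (bsearch ((buildRecs quantiles).map (fun p => p.1)) v (buildRecs quantiles).length 0 (buildRecs quantiles).length)
            ((0 : Int), (0 : Int))).2] else bins)
        = bins ++ (if bsearch ((buildRecs quantiles).map (fun p => p.1)) v (buildRecs quantiles).length 0 (buildRecs quantiles).length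
            < (buildRecs quantiles).length
          then [((buildRecs quantiles).getD
            (bsearch ((buildRecs quantiles).map (fun p => p.1)) v (buildRecs quantiles).length 0 (buildRecs quantiles).length)
            ((0 : Int), (0 : Int))).2] else [])
      split <;> simp
    show values.foldl (fun (bins : List Int) (v : Int) =>
        if bsearch ((buildRecs quantiles).map (fun p => p.1)) v (buildRecs quantiles).length 0 (buildRecs quantiles).length
            < (buildRecs quantiles).length
        then bins ++ [((buildRecs quantiles).getD
          (bsearch ((buildRecs quantiles).map (fun p => p.1)) v (buildRecs quantiles).length 0 (buildRecs quantiles).length)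
          ((0 : Int), (0 : Int))).2] else bins) [] = _
    rw [hfun, PySem.List.foldl_append_eq_flatMap]
    simp
  rw [hA, hB]
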